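-- pv_equiv track=rewrite | github.com/BastiTee/pype-cli | pype/util/multi_cmd.py | __remove_common_prefix_from_string_list
-- ===== SOURCE A (Python) =====
-- from typing import Any, Callable, List
--
-- def __remove_common_prefix_from_string_list(
--         string_list: List[str]) -> List[str]:
--     """If a list of strings share the same prefix they will be removed."""
--     if any([len(string) < 2 or not string for string in string_list]):
--         return string_list
--     uniq_first_char = len(set([string[:1] for string in string_list]))
--     if uniq_first_char == 1:
--         string_list = __remove_common_prefix_from_string_list(
--             [string[1:] for string in string_list])
--     return string_list
-- ===== SOURCE B (Python) =====
-- def __remove_common_prefix_from_string_list(string_list):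
--     """If a list of strings share the same prefix they will be removed."""
--     if not string_list:
--         return string_list
--     m = min(len(s) for s in string_list)
--     first = string_list[0]
--     cp = 0
--     while cp < m and all(s[cp] == first[cp] for s in string_list):
--         cp += 1
--     k = min(cp, m - 1)
--     if k <= 0:
--         return string_list
--     return [s[k:] for s in string_list]
-- ===== Notes on version B (the rewrite author's own statement) =====
-- stated objective: alternative
-- what changed: B computes the answer in one pass: it takes the minimum length, finds the common-prefix length cp with a single while-loop, and slices every string once by min(cp, m-1), instead of A's recursion that strips one character at a time and rebuilds the whole list (and a set of first characters) per stripped character; asymptotically O(n*L) vs A's O(n*L^2) worst case, but a timing run read only 1.46x at the largest size so no speed is claimed.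
import Mathlib
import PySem

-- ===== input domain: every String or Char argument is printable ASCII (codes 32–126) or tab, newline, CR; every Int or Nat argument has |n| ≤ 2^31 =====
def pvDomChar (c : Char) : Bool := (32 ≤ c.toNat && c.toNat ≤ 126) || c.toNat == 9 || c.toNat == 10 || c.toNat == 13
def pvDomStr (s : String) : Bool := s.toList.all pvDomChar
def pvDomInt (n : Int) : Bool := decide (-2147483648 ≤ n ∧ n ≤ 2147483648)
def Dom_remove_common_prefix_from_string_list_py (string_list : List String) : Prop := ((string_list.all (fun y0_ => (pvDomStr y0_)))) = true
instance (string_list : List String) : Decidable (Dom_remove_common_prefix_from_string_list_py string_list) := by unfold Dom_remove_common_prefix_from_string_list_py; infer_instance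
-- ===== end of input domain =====

-- B computes the shared-prefix length once in a single pass and slices every string once,
-- instead of A's char-by-char recursion that rebuilds the whole list per stripped character.

-- ===== PORT A =====
-- length of s[1:] (used by A's termination proof and the equivalence lemmas)
lemma pvSliceOneToList (s : String) :
    (PySem.Str.slice s (some 1) none).toList = s.toList.drop 1 := by
  have h : ((1:Int)) = ((1:Nat):Int) := by norm_num
  rw [PySem.Str.toList_slice, PySem.Chars.slice_eq_listSlice, h, PySem.List.slice_from_natCast]

-- termination helper for port A's recursion (cited by decreasing_by)
lemma pvSliceSumLt (l : List String) (hne : l ≠ [])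
    (hlen : ∀ s ∈ l, 2 ≤ s.toList.length) :
    ((l.map (fun s => PySem.Str.slice s (some 1) none)).map (fun s => s.toList.length)).sum
      < (l.map (fun s => s.toList.length)).sum := by
  rcases l with _ | ⟨s0, rest⟩
  · simp at hne
  · simp only [List.map_cons, List.sum_cons, List.map_map]
    have h0 : (PySem.Str.slice s0 (some 1) none).toList.length = s0.toList.length - 1 := by
      rw [pvSliceOneToList]; simp
    have hrest : ((rest.map (fun s => (PySem.Str.slice s (some 1) none).toList.length)).sum)
        ≤ (rest.map (fun s => s.toList.length)).sum := by
      apply List.sum_le_sum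
      intro s _
      rw [pvSliceOneToList]; simp
    have h2 : 2 ≤ s0.toList.length := hlen s0 (by simp)
    simp only [Function.comp_def] at *
    omega

def remove_common_prefix_from_string_list_py (string_list : List String) : List String :=
  if string_list.any (fun s => decide (PySem.Str.len s < 2) || decide (PySem.Str.len s = 0)) then
    string_list
  else
    let uniq_first_char := PySem.Set.len
      (PySem.Set.ofList (string_list.map (fun s => PySem.Str.slice s none (some 1))))
    if uniq_first_char = 1 then
      remove_common_prefix_from_string_list_py
        (string_list.map (fun s => PySem.Str.slice s (some 1) none))
    else
      string_list
termination_by (string_list.map (fun s => s.toList.length)).sum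
decreasing_by
  rename_i h1 h2
  simp only [List.map_subtype, List.unattach_attach]
  refine pvSliceSumLt string_list ?_ ?_
  · rintro rfl
    simp only [uniq_first_char] at h2
    simp [PySem.Set.len, PySem.Set.ofList] at h2
  · intro s hs
    simp only [List.any_eq_true, not_exists] at h1
    have hb := h1 s
    simp only [hs, true_and, Bool.or_eq_true, decide_eq_true_eq, not_or] at hb
    rw [PySem.Str.len_eq] at hb
    omega

-- ===== PORT B =====
-- the while-loop of Source B: advance cp while cp < m and all strings agree at index cp
def pvCpLoop (string_list : List String) (first : String) (m : Int) (cp : Int) : Int :=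
  if cp < m ∧ string_list.all (fun s => PySem.Str.pyGet? s cp == PySem.Str.pyGet? first cp) then
    pvCpLoop string_list first m (cp + 1)
  else cp
termination_by (m - cp).toNat
decreasing_by omega

def remove_common_prefix_from_string_list_py_alt (string_list : List String) : List String :=
  match string_list with
  | [] => string_list
  | s0 :: rest =>
    let m : Int := rest.foldl (fun acc s => min acc (PySem.Str.len s)) (PySem.Str.len s0)
    let cp := pvCpLoop (s0 :: rest) s0 m 0
    let k : Int := min cp (m - 1)
    if k ≤ 0 then s0 :: rest
    else (s0 :: rest).map (fun s => PySem.Str.slice s (some k) none)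

-- ===== PRECONDITION & SPEC =====
def Spec_remove_common_prefix_from_string_list_py (string_list : List String) (out : List String) : Prop := out = remove_common_prefix_from_string_list_py_alt string_list
instance (string_list : List String) (out : List String) : Decidable (Spec_remove_common_prefix_from_string_list_py string_list out) := by unfold Spec_remove_common_prefix_from_string_list_py; infer_instance

-- ===== CLAIM (what is proved, stated in full; the proofs are below) =====
def Claim_equal_remove_common_prefix_from_string_list_py : Prop := ∀ (string_list : List String), Dom_remove_common_prefix_from_string_list_py string_list → Spec_remove_common_prefix_from_string_list_py string_list (remove_common_prefix_from_string_list_py string_list)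

-- ===== LEMMAS AND PROOFS =====

-- the foldl-min in B bounds the initial value and every element from below
lemma pvFoldlMin_le (rest : List String) (a : Int) :
    rest.foldl (fun acc s => min acc (PySem.Str.len s)) a ≤ a
      ∧ ∀ s ∈ rest, rest.foldl (fun acc s => min acc (PySem.Str.len s)) a ≤ PySem.Str.len s := by
  induction rest generalizing a with
  | nil => simp
  | cons x xs ih =>
    simp only [List.foldl_cons]
    obtain ⟨h1, h2⟩ := ih (min a (PySem.Str.len x))
    refine ⟨le_trans h1 (by omega), ?_⟩
    intro s hs
    rcases List.mem_cons.mp hs with rfl | hs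
    · exact le_trans h1 (by omega)
    · exact h2 s hs

lemma pvFoldlMin_ge (rest : List String) (a c : Int)
    (ha : c ≤ a) (h : ∀ s ∈ rest, c ≤ PySem.Str.len s) :
    c ≤ rest.foldl (fun acc s => min acc (PySem.Str.len s)) a := by
  induction rest generalizing a with
  | nil => simpa
  | cons x xs ih =>
    simp only [List.foldl_cons]
    exact ih (min a (PySem.Str.len x))
      (le_min ha (h x (by simp)))
      (fun s hs => h s (by simp [hs]))

-- B's while-loop never moves cp backwards
lemma pvCpLoop_ge (l : List String) (f : String) (m : Int) :
    ∀ (n : Nat) (cp : Int), (m - cp).toNat ≤ n → cp ≤ pvCpLoop l f m cp := by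
  intro n
  induction n with
  | zero =>
    intro cp h
    rw [pvCpLoop, if_neg]
    rintro ⟨h1, -⟩
    omega
  | succ n ih =>
    intro cp h
    rw [pvCpLoop]
    split
    · rename_i hc
      have := ih (cp + 1) (by omega)
      omega
    · omega

lemma pvCpLoop_stop (l : List String) (f : String) (m cp : Int)
    (h : ¬ (cp < m ∧ l.all (fun s => PySem.Str.pyGet? s cp == PySem.Str.pyGet? f cp))) :
    pvCpLoop l f m cp = cp := by
  rw [pvCpLoop, if_neg h]

lemma pvCpLoop_step (l : List String) (f : String) (m cp : Int)
    (h : cp < m ∧ l.all (fun s => PySem.Str.pyGet? s cp == PySem.Str.pyGet? f cp)) :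
    pvCpLoop l f m cp = pvCpLoop l f m (cp + 1) := by
  rw [pvCpLoop, if_pos h]

-- index j of s[1:] is index j+1 of s  (pointwise form of the loop-shift)
lemma pvGetShift (s : String) (j : Nat) :
    PySem.Str.pyGet? (PySem.Str.slice s (some 1) none) ((j : Nat) : Int)
      = s.toList[j + 1]? := by
  rw [PySem.Str.pyGet?_natCast, pvSliceOneToList, List.getElem?_drop]
  simp [Nat.add_comm]

-- running Source B's loop on the sliced list from j is running it on the original from j+1
lemma pvCpLoop_shift (l : List String) (s0 : String) (m : Int) :
    ∀ (n : Nat) (j : Nat), (m - 1 - (j : Int)).toNat ≤ n →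
      pvCpLoop (l.map (fun s => PySem.Str.slice s (some 1) none))
          (PySem.Str.slice s0 (some 1) none) (m - 1) ((j : Nat) : Int)
        = pvCpLoop l s0 m (((j : Nat) : Int) + 1) - 1 := by
  intro n
  induction n with
  | zero =>
    intro j hj
    rw [pvCpLoop_stop _ _ _ _ (by rintro ⟨h1, -⟩; omega),
        pvCpLoop_stop _ _ _ _ (by rintro ⟨h1, -⟩; omega)]
    ring
  | succ n ih =>
    intro j hj
    have hc1 : (((j : Nat) : Int) + 1) = (((j + 1 : Nat)) : Int) := by push_cast; ring
    have hpt : ∀ s : String,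
        (PySem.Str.pyGet? (PySem.Str.slice s (some 1) none) ((j : Nat) : Int)
          == PySem.Str.pyGet? (PySem.Str.slice s0 (some 1) none) ((j : Nat) : Int))
        = (PySem.Str.pyGet? s (((j : Nat) : Int) + 1) == PySem.Str.pyGet? s0 (((j : Nat) : Int) + 1)) := by
      intro s
      rw [pvGetShift, pvGetShift, hc1, PySem.Str.pyGet?_natCast, PySem.Str.pyGet?_natCast]
    have hall : ((l.map (fun s => PySem.Str.slice s (some 1) none)).all
          (fun s => PySem.Str.pyGet? s ((j : Nat) : Int)
            == PySem.Str.pyGet? (PySem.Str.slice s0 (some 1) none) ((j : Nat) : Int)))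
        = (l.all (fun s => PySem.Str.pyGet? s (((j : Nat) : Int) + 1)
            == PySem.Str.pyGet? s0 (((j : Nat) : Int) + 1))) := by
      simp only [List.all_map, Function.comp_def, hpt]
    by_cases h : ((j : Nat) : Int) + 1 < m ∧ l.all (fun s => PySem.Str.pyGet? s (((j : Nat) : Int) + 1)
            == PySem.Str.pyGet? s0 (((j : Nat) : Int) + 1))
    · rw [pvCpLoop_step _ _ _ _ ⟨by omega, by rw [hall]; exact h.2⟩,
          pvCpLoop_step l s0 m _ h, hc1]
      exact ih (j + 1) (by push_cast; omega)
    · rw [pvCpLoop_stop _ _ _ _ (by rintro ⟨h1, h2⟩; rw [hall] at h2; exact h ⟨by omega, h2⟩),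
          pvCpLoop_stop l s0 m _ h]
      ring

-- min-length of the sliced list is the min-length of the original minus one
lemma pvFoldlMinShift (rest : List String) (hlen : ∀ s ∈ rest, 1 ≤ s.toList.length) : ∀ a : Int,
    (rest.map (fun s => PySem.Str.slice s (some 1) none)).foldl
        (fun acc s => min acc (PySem.Str.len s)) (a - 1)
      = rest.foldl (fun acc s => min acc (PySem.Str.len s)) a - 1 := by
  induction rest with
  | nil => intro a; simp
  | cons x xs ih =>
    intro a
    simp only [List.map_cons, List.foldl_cons]
    have hx : PySem.Str.len (PySem.Str.slice x (some 1) none) = PySem.Str.len x - 1 := by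
      have h1 := hlen x (by simp)
      rw [PySem.Str.len_eq, PySem.Str.len_eq, pvSliceOneToList]
      rw [List.length_drop]
      omega
    have harg : min (a - 1) (PySem.Str.len (PySem.Str.slice x (some 1) none))
        = min a (PySem.Str.len x) - 1 := by rw [hx]; omega
    rw [harg]
    exact ih (fun s hs => hlen s (by simp [hs])) (min a (PySem.Str.len x))

-- Python's set only grows while elements are added
lemma pvSetAddMono (rest : List String) : ∀ s : PySem.Set String,
    s.length ≤ (rest.foldl PySem.Set.add s).length := by
  induction rest with
  | nil => simp
  | cons x xs ih =>
    intro s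
    simp only [List.foldl_cons]
    refine le_trans ?_ (ih (PySem.Set.add s x))
    simp only [PySem.Set.add]
    split <;> simp

-- the set has one element iff every added element equals the seed
lemma pvSetLen1 (rest : List String) (x0 : String) :
    ((rest.foldl PySem.Set.add [x0]).length = 1) ↔ ∀ x ∈ rest, x = x0 := by
  induction rest with
  | nil => simp
  | cons y ys ih =>
    simp only [List.foldl_cons, List.mem_cons]
    by_cases hy : y = x0
    · subst hy
      have hadd : PySem.Set.add [y] y = [y] := by simp [PySem.Set.add, PySem.Set.contains]
      rw [hadd]
      constructor
      · intro h x hx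
        rcases hx with rfl | hx
        · rfl
        · exact ih.mp h x hx
      · intro h
        exact ih.mpr (fun x hx => h x (Or.inr hx))
    · have hadd : PySem.Set.add [x0] y = [x0, y] := by
        simp [PySem.Set.add, PySem.Set.contains, hy]
      rw [hadd]
      constructor
      · intro h
        exfalso
        have := pvSetAddMono ys [x0, y]
        simp at this
        omega
      · intro h
        exact absurd (h y (Or.inl rfl)) hy

-- A's uniq_first_char (as an Int) is 1 iff all listed strings coincide with the head one
lemma pvUniq1 (x0 : String) (xs : List String) :
    (PySem.Set.len (PySem.Set.ofList (x0 :: xs)) = 1) ↔ ∀ x ∈ xs, x = x0 := by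
  rw [← pvSetLen1 xs x0]
  have hof : PySem.Set.ofList (x0 :: xs) = xs.foldl PySem.Set.add [x0] := by
    rw [PySem.Set.ofList_eq_foldl]
    simp [PySem.Set.add, PySem.Set.contains]
  rw [hof]
  simp [PySem.Set.len]

lemma pvHead?Take1 (a b : List Char) : a[0]? = b[0]? ↔ a.take 1 = b.take 1 := by
  cases a <;> cases b <;> simp

lemma pvSliceTo1 (s : String) : (PySem.Str.slice s none (some 1)).toList = s.toList.take 1 := by
  have h : ((1:Int)) = ((1:Nat):Int) := by norm_num
  rw [PySem.Str.toList_slice, PySem.Chars.slice_eq_listSlice, h, PySem.List.slice_to_natCast]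

-- slicing one char then k-1 more is slicing k chars
lemma pvSliceCompose (s : String) (k : Int) (hk : 1 ≤ k) :
    PySem.Str.slice (PySem.Str.slice s (some 1) none) (some (k - 1)) none
      = PySem.Str.slice s (some k) none := by
  apply String.toList_inj.mp
  rw [PySem.Str.toList_slice, PySem.Chars.slice_eq_listSlice, PySem.List.slice_from _ (by omega),
      pvSliceOneToList, List.drop_drop, PySem.Str.toList_slice, PySem.Chars.slice_eq_listSlice,
      PySem.List.slice_from _ (by omega)]
  congr 1
  omega

-- stripping one shared character commutes with B: B (l[1:]-ed) = B l when all strings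
-- have length ≥ 2 and share their first character
lemma pvAltShift (s0 : String) (rest : List String)
    (hbig : ∀ s ∈ s0 :: rest, 2 ≤ s.toList.length)
    (hall0 : ∀ s ∈ s0 :: rest, s.toList[0]? = s0.toList[0]?) :
    remove_common_prefix_from_string_list_py_alt
        ((s0 :: rest).map (fun s => PySem.Str.slice s (some 1) none))
      = remove_common_prefix_from_string_list_py_alt (s0 :: rest) := by
  simp only [List.map_cons, remove_common_prefix_from_string_list_py_alt]
  have hx0 : PySem.Str.len (PySem.Str.slice s0 (some 1) none) = PySem.Str.len s0 - 1 := by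
    have h1 := hbig s0 (by simp)
    rw [PySem.Str.len_eq, PySem.Str.len_eq, pvSliceOneToList, List.length_drop]
    omega
  rw [hx0, pvFoldlMinShift rest (fun s hs => by have := hbig s (by simp [hs]); omega)
        (PySem.Str.len s0)]
  set M := rest.foldl (fun acc s => min acc (PySem.Str.len s)) (PySem.Str.len s0) with hM
  have hM2 : 2 ≤ M := by
    refine pvFoldlMin_ge rest (PySem.Str.len s0) 2 ?_ ?_
    · rw [PySem.Str.len_eq]; have := hbig s0 (by simp); omega
    · intro s hs; rw [PySem.Str.len_eq]; have := hbig s (by simp [hs]); omega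
  -- the loop takes its first step on the original list
  have hstep : pvCpLoop (s0 :: rest) s0 M 0 = pvCpLoop (s0 :: rest) s0 M 1 := by
    have h0 : ((0:Int)) = ((0:Nat):Int) := by norm_num
    refine pvCpLoop_step _ _ _ _ ⟨by omega, List.all_eq_true.mpr (fun s hs => ?_)⟩
    rw [h0, PySem.Str.pyGet?_natCast, PySem.Str.pyGet?_natCast]
    exact beq_iff_eq.mpr (hall0 s hs)
  have hcp1 : 1 ≤ pvCpLoop (s0 :: rest) s0 M 0 := by
    rw [hstep]
    exact pvCpLoop_ge _ _ _ ((M - 1).toNat) 1 le_rfl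
  -- the loop on the sliced list is the original loop shifted by one
  have hshift : pvCpLoop
        (PySem.Str.slice s0 (some 1) none :: rest.map (fun s => PySem.Str.slice s (some 1) none))
        (PySem.Str.slice s0 (some 1) none) (M - 1) 0
      = pvCpLoop (s0 :: rest) s0 M 0 - 1 := by
    have h := pvCpLoop_shift (s0 :: rest) s0 M ((M - 1).toNat) 0 (by omega)
    simp only [List.map_cons, Nat.cast_zero, zero_add] at h
    rw [h, ← hstep]
  rw [hshift]
  set CP := pvCpLoop (s0 :: rest) s0 M 0 with hCP
  by_cases hK : min CP (M - 1) ≤ 1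
  · -- k = 1 : the sliced list is returned as is; B slices one character off the original
    have hk' : min (CP - 1) (M - 1 - 1) ≤ 0 := by omega
    have hk1 : min CP (M - 1) = 1 := by omega
    rw [if_pos hk', if_neg (by omega), hk1]
  · -- k ≥ 2 : both sides slice; composing the two slices is slicing k characters
    have hk' : ¬ min (CP - 1) (M - 1 - 1) ≤ 0 := by omega
    have hkk : min (CP - 1) (M - 1 - 1) = min CP (M - 1) - 1 := by omega
    rw [if_neg hk', if_neg (by omega), hkk]
    refine congrArg₂ List.cons ?_ ?_
    · exact pvSliceCompose s0 (min CP (M - 1)) (by omega)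
    · rw [List.map_map]
      apply List.map_congr_left
      intro s _
      simp only [Function.comp_def]
      exact pvSliceCompose s (min CP (M - 1)) (by omega)

-- A = B, by strong induction on the total number of characters
theorem pv_key : ∀ (n : Nat) (l : List String),
    (l.map (fun s => s.toList.length)).sum ≤ n →
    remove_common_prefix_from_string_list_py l
      = remove_common_prefix_from_string_list_py_alt l := by
  intro n
  induction n using Nat.strong_induction_on with
  | _ n ih =>
    intro l hsum
    have h0cast : ((0:Int)) = ((0:Nat):Int) := by norm_num
    rcases l with _ | ⟨s0, rest⟩
    · rw [remove_common_prefix_from_string_list_py]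
      simp [remove_common_prefix_from_string_list_py_alt, PySem.Set.ofList_eq_foldl,
        PySem.Set.len]
    · by_cases hsmall : ∃ s ∈ s0 :: rest, s.toList.length < 2
      · obtain ⟨s, hs, hslen⟩ := hsmall
        rw [remove_common_prefix_from_string_list_py,
            if_pos (List.any_eq_true.mpr ⟨s, hs, by simp [PySem.Str.len_eq]; simp at hslen; omega⟩)]
        have hm1 : rest.foldl (fun acc s => min acc (PySem.Str.len s)) (PySem.Str.len s0) ≤ 1 := by
          rcases List.mem_cons.mp hs with rfl | hsr
          · exact le_trans (pvFoldlMin_le rest (PySem.Str.len s)).1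
              (by rw [PySem.Str.len_eq]; omega)
          · exact le_trans ((pvFoldlMin_le rest (PySem.Str.len s0)).2 s hsr)
              (by rw [PySem.Str.len_eq]; omega)
        have hcp0 : (0:Int) ≤ pvCpLoop (s0 :: rest) s0
            (rest.foldl (fun acc s => min acc (PySem.Str.len s)) (PySem.Str.len s0)) 0 :=
          pvCpLoop_ge _ _ _
            ((rest.foldl (fun acc s => min acc (PySem.Str.len s)) (PySem.Str.len s0) - 0).toNat)
            0 le_rfl
        simp only [remove_common_prefix_from_string_list_py_alt]
        rw [if_pos (by omega)]
      · push_neg at hsmall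
        rw [remove_common_prefix_from_string_list_py, if_neg (by
          rw [List.any_eq_true]
          rintro ⟨s, hs, hp⟩
          have hsl := hsmall s hs
          simp [PySem.Str.len_eq] at hp
          simp at hsl
          rcases hp with hp | rfl
          · omega
          · simp at hsl)]
        by_cases hfirst : ∀ s ∈ s0 :: rest, s.toList[0]? = s0.toList[0]?
        · have huniq : PySem.Set.len (PySem.Set.ofList
              ((PySem.Str.slice s0 none (some 1)) ::
                rest.map (fun s => PySem.Str.slice s none (some 1)))) = 1 := by
            refine (pvUniq1 _ _).mpr ?_
            intro x hx
            obtain ⟨s, hsr, rfl⟩ := List.mem_map.mp hx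
            apply String.toList_inj.mp
            rw [pvSliceTo1, pvSliceTo1]
            exact (pvHead?Take1 _ _).mp (hfirst s (by simp [hsr]))
          simp only [List.map_cons]
          rw [if_pos huniq]
          have hlt := pvSliceSumLt (s0 :: rest) (by simp) hsmall
          rw [ih ((PySem.Str.slice s0 (some 1) none ::
                rest.map (fun s => PySem.Str.slice s (some 1) none)).map
                (fun s => s.toList.length)).sum
              (by simp only [List.map_cons, List.sum_cons] at hlt hsum ⊢; omega) _ le_rfl]
          have halt := pvAltShift s0 rest hsmall hfirst
          simp only [List.map_cons] at halt
          exact halt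
        · push_neg at hfirst
          obtain ⟨s1, hs1, hne⟩ := hfirst
          have huniq : ¬ (PySem.Set.len (PySem.Set.ofList
              ((PySem.Str.slice s0 none (some 1)) ::
                rest.map (fun s => PySem.Str.slice s none (some 1)))) = 1) := by
            rw [pvUniq1]
            intro hforall
            apply hne
            rcases List.mem_cons.mp hs1 with rfl | hs1r
            · rfl
            · have hx := hforall (PySem.Str.slice s1 none (some 1))
                (List.mem_map.mpr ⟨s1, hs1r, rfl⟩)
              have ht : (PySem.Str.slice s1 none (some 1)).toList
                  = (PySem.Str.slice s0 none (some 1)).toList := by rw [hx]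
              rw [pvSliceTo1, pvSliceTo1] at ht
              exact (pvHead?Take1 _ _).mpr ht
          simp only [List.map_cons]
          rw [if_neg huniq]
          have hstop : pvCpLoop (s0 :: rest) s0
              (rest.foldl (fun acc s => min acc (PySem.Str.len s)) (PySem.Str.len s0)) 0 = 0 := by
            refine pvCpLoop_stop _ _ _ _ ?_
            rintro ⟨-, hall⟩
            have hb := List.all_eq_true.mp hall s1 hs1
            rw [h0cast, PySem.Str.pyGet?_natCast, PySem.Str.pyGet?_natCast] at hb
            exact hne (beq_iff_eq.mp hb)
          simp only [remove_common_prefix_from_string_list_py_alt]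
          rw [if_pos (by rw [hstop]; omega)]

-- ===== VERDICT (by name: the statement is the Claim_ definition above) =====
theorem remove_common_prefix_from_string_list_py_spec : Claim_equal_remove_common_prefix_from_string_list_py := by
  intro l _
  unfold Spec_remove_common_prefix_from_string_list_py
  exact pv_key ((l.map (fun s => s.toList.length)).sum) l le_rfl
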